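-- pv_equiv track=rewrite | github.com/sanghyun-io/tunnelforge | src/ui/dialogs/sql_editor_dialog.py | _is_modification_query
-- ===== SOURCE A (Python) =====
-- def _is_modification_query(query):
--     """수정 쿼리인지 확인 (SELECT가 아닌 쿼리)"""
--     query_upper = query.upper().strip()
--     # 주석 제거
--     while query_upper.startswith('--') or query_upper.startswith('#'):
--         newline_idx = query_upper.find('\n')
--         if newline_idx == -1:
--             return False
--         query_upper = query_upper[newline_idx + 1:].strip()
--
--     modification_keywords = ['INSERT', 'UPDATE', 'DELETE', 'TRUNCATE', 'DROP', 'ALTER', 'CREATE', 'REPLACE']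
--     return any(query_upper.startswith(kw) for kw in modification_keywords)
-- ===== SOURCE B (Python) =====
-- MODIFICATION_KEYWORDS = ('INSERT', 'UPDATE', 'DELETE', 'TRUNCATE', 'DROP', 'ALTER', 'CREATE', 'REPLACE')
--
-- def _is_modification_query(query):
--     """수정 쿼리인지 확인 (SELECT가 아닌 쿼리)"""
--     for line in query.upper().split('\n'):
--         stripped = line.strip()
--         if not stripped or stripped.startswith('--') or stripped.startswith('#'):
--             continue
--         return stripped.startswith(MODIFICATION_KEYWORDS)
--     return False
-- ===== Notes on version B (the rewrite author's own statement) =====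
-- stated objective: idiomatic
-- what changed: Replaces the while-loop comment stripper (repeated strip + newline find + slicing of the remaining string) by a single pass over the uppercased query's newline-split lines that skips blank and comment lines and tests the first effective line against the keyword tuple.
import Mathlib
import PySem

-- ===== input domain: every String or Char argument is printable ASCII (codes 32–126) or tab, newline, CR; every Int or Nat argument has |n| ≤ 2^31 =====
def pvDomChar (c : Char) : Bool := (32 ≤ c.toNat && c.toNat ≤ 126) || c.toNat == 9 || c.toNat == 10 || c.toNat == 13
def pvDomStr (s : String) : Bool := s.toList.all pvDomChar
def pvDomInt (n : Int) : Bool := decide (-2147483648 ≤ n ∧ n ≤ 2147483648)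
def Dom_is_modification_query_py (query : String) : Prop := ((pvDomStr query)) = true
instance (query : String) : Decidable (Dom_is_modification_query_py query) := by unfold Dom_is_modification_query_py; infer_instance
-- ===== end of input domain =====

-- B replaces A's while-loop comment stripper (strip + find('\n') + slice, repeated) by one
-- pass over the lines of query.upper().split('\n'), skipping blank/comment lines (idiomatic).

-- ===== PORT A =====

-- termination helper for the port's while loop (cited in decreasing_by)
theorem pv_strip_length_le (x : List Char) :
    (PySem.Chars.strip x).length ≤ x.length := by
  unfold PySem.Chars.strip PySem.Chars.rstrip PySem.Chars.lstrip
  calc (List.dropWhile PySem.Chars.isspace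
          (List.dropWhile PySem.Chars.isspace x).reverse).reverse.length
      ≤ (List.dropWhile PySem.Chars.isspace x).reverse.length := by
        rw [List.length_reverse]; exact List.length_dropWhile_le _ _
    _ ≤ x.length := by
        rw [List.length_reverse]; exact List.length_dropWhile_le _ _

theorem pv_loopA_dec (q : List Char)
    (h2 : PySem.Chars.find q ['\n'] ≠ -1) :
    (PySem.Chars.strip
      (PySem.Chars.slice q (some (PySem.Chars.find q ['\n'] + 1)) none)).length
      < q.length := by
  have hinf : ['\n'] <:+: q := (PySem.Chars.find_ne_neg_one_iff _ _).mp h2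
  have hmem : '\n' ∈ q := List.singleton_sublist.mp hinf.sublist
  have hq : q ≠ [] := by intro h; subst h; simp at hmem
  have h0 : 0 ≤ PySem.Chars.find q ['\n'] := (PySem.Chars.find_nonneg_iff _ _).mpr hinf
  rw [PySem.Chars.slice_eq_listSlice, PySem.List.slice_from _ (by omega)]
  refine lt_of_le_of_lt (pv_strip_length_le _) ?_
  rw [List.length_drop]
  have hlen : 1 ≤ q.length := List.length_pos_iff.mpr hq
  omega

-- while-loop of A, on the already upper()-ed and strip()-ed text
def pvLoopA (q : List Char) : Bool :=
  if PySem.Chars.startswith q ['-', '-'] || PySem.Chars.startswith q ['#'] then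
    -- newline_idx = query_upper.find('\n')
    if h2 : PySem.Chars.find q ['\n'] = -1 then false
    else
      -- query_upper = query_upper[newline_idx + 1:].strip()
      pvLoopA (PySem.Chars.strip
        (PySem.Chars.slice q (some (PySem.Chars.find q ['\n'] + 1)) none))
  else
    let modification_keywords : List (List Char) :=
      [['I','N','S','E','R','T'], ['U','P','D','A','T','E'], ['D','E','L','E','T','E'],
       ['T','R','U','N','C','A','T','E'], ['D','R','O','P'], ['A','L','T','E','R'],
       ['C','R','E','A','T','E'], ['R','E','P','L','A','C','E']]
    modification_keywords.any (fun kw => PySem.Chars.startswith q kw)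
termination_by q.length
decreasing_by exact pv_loopA_dec q h2

def is_modification_query_py (query : String) : Bool :=
  pvLoopA (PySem.Chars.strip (PySem.Chars.upper query.toList))

-- ===== PORT B =====

def pvModificationKeywords : List (List Char) :=
  [['I','N','S','E','R','T'], ['U','P','D','A','T','E'], ['D','E','L','E','T','E'],
   ['T','R','U','N','C','A','T','E'], ['D','R','O','P'], ['A','L','T','E','R'],
   ['C','R','E','A','T','E'], ['R','E','P','L','A','C','E']]

-- one pass over the lines: skip blank and comment lines, decide on the first effective line
def pvLoopB : List (List Char) → Bool
  | [] => false
  | line :: rest =>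
    let stripped := PySem.Chars.strip line
    if stripped.isEmpty || PySem.Chars.startswith stripped ['-', '-']
        || PySem.Chars.startswith stripped ['#'] then
      pvLoopB rest
    else
      pvModificationKeywords.any (fun kw => PySem.Chars.startswith stripped kw)

-- query.upper().split('\n') ported via List.splitOn '\n' (exact for a one-character separator)
def is_modification_query_py_alt (query : String) : Bool :=
  pvLoopB ((PySem.Chars.upper query.toList).splitOn '\n')

-- ===== PRECONDITION & SPEC =====
def Spec_is_modification_query_py (query : String) (out : Bool) : Prop := out = is_modification_query_py_alt query
instance (query : String) (out : Bool) : Decidable (Spec_is_modification_query_py query out) := by unfold Spec_is_modification_query_py; infer_instance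

-- ===== CLAIM (what is proved, stated in full; the proofs are below) =====
def Claim_equal_is_modification_query_py : Prop := ∀ (query : String), Dom_is_modification_query_py query → Spec_is_modification_query_py query (is_modification_query_py query)

-- ===== LEMMAS AND PROOFS =====

theorem pv_rstrip_prefix (x : List Char) : PySem.Chars.rstrip x <+: x := by
  unfold PySem.Chars.rstrip
  rw [← List.reverse_suffix, List.reverse_reverse]
  exact List.dropWhile_suffix _

theorem pv_lstrip_mem {c : Char} {x : List Char}
    (h : c ∈ PySem.Chars.lstrip x) : c ∈ x := by
  exact (List.dropWhile_sublist _).mem h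

theorem pv_strip_mem {c : Char} {x : List Char}
    (h : c ∈ PySem.Chars.strip x) : c ∈ x := by
  exact pv_lstrip_mem ((pv_rstrip_prefix _).sublist.mem h)

theorem pv_rstrip_eq_nil_iff (x : List Char) :
    PySem.Chars.rstrip x = [] ↔ ∀ c ∈ x, PySem.Chars.isspace c = true := by
  simp [PySem.Chars.rstrip, List.dropWhile_eq_nil_iff]

theorem pv_strip_eq_nil_iff (x : List Char) :
    PySem.Chars.strip x = [] ↔ ∀ c ∈ x, PySem.Chars.isspace c = true := by
  unfold PySem.Chars.strip
  rw [pv_rstrip_eq_nil_iff]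
  constructor
  · intro h c hc
    rcases (List.mem_append.mp (by
        rw [List.takeWhile_append_dropWhile (p := PySem.Chars.isspace) (l := x)]; exact hc)) with h1 | h2
    · exact List.mem_takeWhile_imp h1
    · exact h c h2
  · intro h c hc
    exact h c (pv_lstrip_mem hc)

theorem pv_dropWhile_ws_append (w x : List Char)
    (hw : ∀ c ∈ w, PySem.Chars.isspace c = true) :
    List.dropWhile PySem.Chars.isspace (w ++ x)
      = List.dropWhile PySem.Chars.isspace x := by
  rw [List.dropWhile_append, List.dropWhile_eq_nil_iff.mpr hw]
  simp

theorem pv_strip_ws_append (w x : List Char)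
    (hw : ∀ c ∈ w, PySem.Chars.isspace c = true) :
    PySem.Chars.strip (w ++ x) = PySem.Chars.strip x := by
  unfold PySem.Chars.strip PySem.Chars.lstrip
  rw [pv_dropWhile_ws_append w x hw]

theorem pv_rstrip_ws_append (x w : List Char)
    (hw : ∀ c ∈ w, PySem.Chars.isspace c = true) :
    PySem.Chars.rstrip (x ++ w) = PySem.Chars.rstrip x := by
  unfold PySem.Chars.rstrip
  rw [List.reverse_append, pv_dropWhile_ws_append _ _ (by simpa using hw)]

theorem pv_lstrip_append_of_ne_nil (x y : List Char)
    (h : PySem.Chars.lstrip x ≠ []) :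
    PySem.Chars.lstrip (x ++ y) = PySem.Chars.lstrip x ++ y := by
  unfold PySem.Chars.lstrip at *
  rw [List.dropWhile_append, if_neg]
  simp only [List.isEmpty_iff]
  exact h

theorem pv_rstrip_append_of_ne_nil (x y : List Char)
    (h : PySem.Chars.rstrip y ≠ []) :
    PySem.Chars.rstrip (x ++ y) = x ++ PySem.Chars.rstrip y := by
  unfold PySem.Chars.rstrip at *
  rw [List.reverse_append, List.dropWhile_append, if_neg, List.reverse_append,
    List.reverse_reverse]
  simp only [List.isEmpty_iff]
  intro hnil
  exact h (by rw [hnil]; rfl)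

theorem pv_rstrip_idem (x : List Char) :
    PySem.Chars.rstrip (PySem.Chars.rstrip x) = PySem.Chars.rstrip x := by
  unfold PySem.Chars.rstrip
  rw [List.reverse_reverse]
  cases h : List.dropWhile PySem.Chars.isspace x.reverse with
  | nil => simp
  | cons a t =>
    have ha := List.head_dropWhile_not PySem.Chars.isspace (l := x.reverse) (by simp [h])
    simp only [h, List.head_cons] at ha
    rw [List.dropWhile_cons_of_neg (by simp [ha])]

theorem pv_strip_rstrip (x : List Char) :
    PySem.Chars.strip (PySem.Chars.rstrip x) = PySem.Chars.strip x := by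
  induction x with
  | nil => rfl
  | cons c t ih =>
    by_cases hws : PySem.Chars.isspace c = true
    · by_cases ht : PySem.Chars.rstrip t = []
      · have hall := (pv_rstrip_eq_nil_iff t).mp ht
        have hall' : ∀ a ∈ c :: t, PySem.Chars.isspace a = true := by
          intro a ha
          rcases List.mem_cons.mp ha with rfl | h
          · exact hws
          · exact hall a h
        rw [(pv_rstrip_eq_nil_iff _).mpr hall', (pv_strip_eq_nil_iff _).mpr hall']
        rfl
      · have h1 : PySem.Chars.rstrip (c :: t) = c :: PySem.Chars.rstrip t := by
          simpa using pv_rstrip_append_of_ne_nil [c] t ht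
        have hc : ∀ a ∈ [c], PySem.Chars.isspace a = true := by simpa using hws
        rw [h1, show c :: PySem.Chars.rstrip t = [c] ++ PySem.Chars.rstrip t from rfl,
          pv_strip_ws_append [c] _ hc, ih,
          show (c :: t : List Char) = [c] ++ t from rfl, pv_strip_ws_append [c] t hc]
    · have hstrip_cons : ∀ y : List Char,
          PySem.Chars.strip (c :: y) = PySem.Chars.rstrip (c :: y) := by
        intro y
        unfold PySem.Chars.strip PySem.Chars.lstrip
        rw [List.dropWhile_cons_of_neg hws]
      by_cases ht : PySem.Chars.rstrip t = []
      · have h1 : PySem.Chars.rstrip (c :: t) = PySem.Chars.rstrip [c] := by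
          simpa using pv_rstrip_ws_append [c] t ((pv_rstrip_eq_nil_iff t).mp ht)
        have h2 : PySem.Chars.rstrip [c] = [c] := by
          unfold PySem.Chars.rstrip
          simp [List.dropWhile_cons_of_neg hws]
        rw [h1, h2, hstrip_cons ([] : List Char), h2, hstrip_cons t, h1, h2]
      · have h1 : PySem.Chars.rstrip (c :: t) = c :: PySem.Chars.rstrip t := by
          simpa using pv_rstrip_append_of_ne_nil [c] t ht
        have h2 : PySem.Chars.rstrip (c :: PySem.Chars.rstrip t) = c :: PySem.Chars.rstrip t := by
          have hne : PySem.Chars.rstrip (PySem.Chars.rstrip t) ≠ [] := by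
            rw [pv_rstrip_idem]; exact ht
          calc PySem.Chars.rstrip (c :: PySem.Chars.rstrip t)
              = [c] ++ PySem.Chars.rstrip (PySem.Chars.rstrip t) :=
                pv_rstrip_append_of_ne_nil [c] _ hne
            _ = c :: PySem.Chars.rstrip t := by rw [pv_rstrip_idem]; rfl
        rw [h1, hstrip_cons (PySem.Chars.rstrip t), hstrip_cons t, h2, h1]

theorem pv_prefix_rstrip_iff (p x : List Char) (hp : p ≠ [])
    (hws : ∀ c ∈ p, PySem.Chars.isspace c = false) :
    p <+: PySem.Chars.rstrip x ↔ p <+: x := by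
  constructor
  · intro h
    exact h.trans (pv_rstrip_prefix x)
  · rintro ⟨t, rfl⟩
    by_cases ht : PySem.Chars.rstrip t = []
    · rw [pv_rstrip_ws_append p t ((pv_rstrip_eq_nil_iff t).mp ht)]
      have hself : PySem.Chars.rstrip p = p := by
        unfold PySem.Chars.rstrip
        cases hp' : p.reverse with
        | nil => exact absurd (by simpa using congrArg List.reverse hp') hp
        | cons a s =>
          have ha : a ∈ p := by
            rw [← List.mem_reverse, hp']
            exact List.mem_cons_self ..
          rw [List.dropWhile_cons_of_neg (by simp [hws a ha]), ← hp', List.reverse_reverse]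
      rw [hself]
    · rw [pv_rstrip_append_of_ne_nil p t ht]
      exact List.prefix_append _ _

theorem pv_prefix_append_newline_iff (p a b : List Char) (hp : '\n' ∉ p) :
    p <+: a ++ '\n' :: b ↔ p <+: a := by
  constructor
  · rintro ⟨t, ht⟩
    by_cases hlen : p.length ≤ a.length
    · have h1 : p = List.take p.length (a ++ '\n' :: b) := by
        rw [← ht, List.take_left]
      rw [h1, List.take_append_of_le_length hlen]
      exact List.take_prefix _ _
    · exfalso
      push_neg at hlen
      have h1 : (p ++ t)[a.length]? = p[a.length]? := by
        rw [List.getElem?_append, if_pos hlen]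
      have h2 : (a ++ '\n' :: b)[a.length]? = some '\n' := by
        rw [List.getElem?_append_right le_rfl]
        simp
      rw [ht, h2] at h1
      exact hp (List.mem_of_getElem? h1.symm)
  · intro h
    exact h.trans (List.prefix_append _ _)

theorem pv_singleton_infix_iff (c : Char) (x : List Char) :
    [c] <:+: x ↔ c ∈ x := by
  constructor
  · intro h
    exact List.singleton_sublist.mp h.sublist
  · intro h
    obtain ⟨s, t, rfl⟩ := List.append_of_mem h
    exact ⟨s, t, by simp⟩

theorem pv_find_newline (a b : List Char) (ha : '\n' ∉ a) :
    PySem.Chars.find (a ++ '\n' :: b) ['\n'] = (a.length : Int) := by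
  have hinfix : ['\n'] <:+: (a ++ '\n' :: b) := (pv_singleton_infix_iff _ _).mpr (by simp)
  have h0 : 0 ≤ PySem.Chars.find (a ++ '\n' :: b) ['\n'] :=
    (PySem.Chars.find_nonneg_iff _ _).mpr hinfix
  obtain ⟨hpre, hmin⟩ := PySem.Chars.find_spec h0
  set k := (PySem.Chars.find (a ++ '\n' :: b) ['\n']).toNat with hk
  have hk_le : k ≤ a.length := by
    by_contra hlt
    push_neg at hlt
    exact hmin a.length hlt (by rw [List.drop_left]; exact ⟨b, rfl⟩)
  have hk_ge : a.length ≤ k := by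
    by_contra hlt
    push_neg at hlt
    obtain ⟨u, hu⟩ := hpre
    have hg : (a ++ '\n' :: b)[k]? = some '\n' := by
      have : ((a ++ '\n' :: b).drop k)[0]? = some '\n' := by rw [← hu]; rfl
      rwa [List.getElem?_drop, Nat.add_zero] at this
    rw [List.getElem?_append, if_pos hlt] at hg
    exact ha (List.mem_of_getElem? hg)
  have hke : k = a.length := le_antisymm hk_le hk_ge
  have := Int.toNat_of_nonneg h0
  omega

theorem pv_any_congr (ks : List (List Char)) (f g : List Char → Bool)
    (h : ∀ kw ∈ ks, f kw = g kw) : ks.any f = ks.any g := by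
  induction ks with
  | nil => rfl
  | cons a t ih =>
    simp only [List.any_cons]
    rw [h a (List.mem_cons_self ..), ih (fun kw hk => h kw (List.mem_cons_of_mem _ hk))]

theorem pv_loopA_nil : pvLoopA [] = false := by
  unfold pvLoopA
  simp [PySem.Chars.startswith, List.isPrefixOf]

theorem pv_loopB_skip (line : List Char) (rest : List (List Char))
    (h : ((PySem.Chars.strip line).isEmpty
      || PySem.Chars.startswith (PySem.Chars.strip line) ['-', '-']
      || PySem.Chars.startswith (PySem.Chars.strip line) ['#']) = true) :
    pvLoopB (line :: rest) = pvLoopB rest := by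
  simp only [pvLoopB]
  rw [h]
  simp

theorem pv_loopB_keep (line : List Char) (rest : List (List Char))
    (h : ((PySem.Chars.strip line).isEmpty
      || PySem.Chars.startswith (PySem.Chars.strip line) ['-', '-']
      || PySem.Chars.startswith (PySem.Chars.strip line) ['#']) = false) :
    pvLoopB (line :: rest)
      = pvModificationKeywords.any
          (fun kw => PySem.Chars.startswith (PySem.Chars.strip line) kw) := by
  simp only [pvLoopB]
  rw [h]
  simp

theorem pv_kw_facts : ∀ kw ∈ pvModificationKeywords,
    kw ≠ [] ∧ '\n' ∉ kw ∧ ∀ c ∈ kw, PySem.Chars.isspace c = false := by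
  intro kw hkw
  fin_cases hkw <;>
    exact ⟨by decide, by decide, by intro c hc; fin_cases hc <;> decide⟩

theorem pv_main : ∀ (n : Nat) (l : List Char), l.length ≤ n →
    pvLoopA (PySem.Chars.strip l) = pvLoopB (l.splitOn '\n') := by
  intro n
  induction n with
  | zero =>
    intro l hl
    have hnil : l = [] := List.eq_nil_of_length_eq_zero (Nat.le_zero.mp hl)
    subst hnil
    have h0 : PySem.Chars.strip ([] : List Char) = [] := rfl
    rw [h0, pv_loopA_nil, List.splitOn_nil]
    simp [pvLoopB, h0]
  | succ n ih =>
    intro l hl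
    by_cases hn : '\n' ∈ l
    · -- there is a newline: l = a ++ '\n' :: r with '\n' ∉ a
      obtain ⟨a, r, hl_eq, hna⟩ : ∃ a r, l = a ++ '\n' :: r ∧ '\n' ∉ a := by
        have hdne : l.dropWhile (fun c => !(c == '\n')) ≠ [] := by
          intro h
          rw [List.dropWhile_eq_nil_iff] at h
          simpa using h '\n' hn
        obtain ⟨d, t, hdt⟩ := List.exists_cons_of_ne_nil hdne
        have hd := List.head_dropWhile_not (fun c : Char => !(c == '\n')) hdne
        simp only [hdt, List.head_cons] at hd
        simp only [Bool.not_eq_false', beq_iff_eq] at hd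
        refine ⟨l.takeWhile (fun c => !(c == '\n')), t, ?_, ?_⟩
        · conv_lhs => rw [← List.takeWhile_append_dropWhile
            (p := fun c : Char => !(c == '\n')) (l := l)]
          rw [hdt, hd]
        · intro h
          simpa using List.mem_takeWhile_imp h
      have hsplit : l.splitOn '\n' = a :: r.splitOn '\n' := by
        rw [hl_eq]
        simp only [List.splitOn]
        exact List.splitOnP_first _ a
          (by intro x hx; simp only [beq_iff_eq]; rintro rfl; exact hna hx) '\n' (by simp) r
      have hrlen : r.length ≤ n := by
        have : l.length = a.length + 1 + r.length := by rw [hl_eq]; simp; omega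
        omega
      have hIH := ih r hrlen
      rw [hsplit]
      by_cases hA : PySem.Chars.strip a = []
      · -- blank or all-whitespace line: both sides skip it
        have hws_a : ∀ c ∈ a, PySem.Chars.isspace c = true := (pv_strip_eq_nil_iff a).mp hA
        have hsl : PySem.Chars.strip l = PySem.Chars.strip r := by
          rw [hl_eq, show a ++ '\n' :: r = (a ++ ['\n']) ++ r by simp]
          refine pv_strip_ws_append _ _ ?_
          intro c hc
          rcases List.mem_append.mp hc with h | h
          · exact hws_a c h
          · simp at h; subst h; rfl
        rw [hsl, hIH, pv_loopB_skip a _ (by simp [hA])]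
      · -- a is the candidate line (stripped non-empty)
        have ha'ne : PySem.Chars.lstrip a ≠ [] := by
          intro h
          apply hA
          unfold PySem.Chars.strip
          rw [h]
          rfl
        have ha'nl : '\n' ∉ PySem.Chars.lstrip a := fun h => hna (pv_lstrip_mem h)
        have hlsl : PySem.Chars.lstrip l = PySem.Chars.lstrip a ++ '\n' :: r := by
          rw [hl_eq, show a ++ '\n' :: r = a ++ ('\n' :: r) from rfl,
            pv_lstrip_append_of_ne_nil a _ ha'ne]
        have hstrips : PySem.Chars.strip l
            = PySem.Chars.rstrip (PySem.Chars.lstrip a ++ '\n' :: r) := by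
          unfold PySem.Chars.strip
          rw [hlsl]
        have hra' : PySem.Chars.rstrip (PySem.Chars.lstrip a) = PySem.Chars.strip a := rfl
        by_cases hrw : PySem.Chars.rstrip r = []
        · -- everything after the newline is whitespace: strip l = strip a
          have hstrip_eq : PySem.Chars.strip l = PySem.Chars.strip a := by
            rw [hstrips, show PySem.Chars.lstrip a ++ '\n' :: r
                = PySem.Chars.lstrip a ++ ('\n' :: r) from rfl,
              pv_rstrip_ws_append _ ('\n' :: r) ?_, hra']
            intro c hc
            rcases List.mem_cons.mp hc with rfl | h
            · rfl
            · exact (pv_rstrip_eq_nil_iff r).mp hrw c h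
          rw [hstrip_eq]
          have hsr : PySem.Chars.strip r = [] :=
            (pv_strip_eq_nil_iff r).mpr ((pv_rstrip_eq_nil_iff r).mp hrw)
          have hloopr : pvLoopB (r.splitOn '\n') = false := by
            rw [← hIH, hsr, pv_loopA_nil]
          by_cases hm : (PySem.Chars.startswith (PySem.Chars.strip a) ['-', '-']
              || PySem.Chars.startswith (PySem.Chars.strip a) ['#']) = true
          · have hnosa : '\n' ∉ PySem.Chars.strip a := fun h => hna (pv_strip_mem h)
            have hfind : PySem.Chars.find (PySem.Chars.strip a) ['\n'] = -1 :=
              (PySem.Chars.find_eq_neg_one_iff _ _).mpr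
                (fun h => hnosa (List.singleton_sublist.mp h.sublist))
            unfold pvLoopA
            rw [if_pos hm, dif_pos hfind, pv_loopB_skip a _ (by simp only [Bool.or_eq_true] at hm ⊢; tauto)]
            exact hloopr.symm
          · unfold pvLoopA
            rw [if_neg hm]
            simp only [Bool.or_eq_true, not_or, Bool.not_eq_true] at hm
            have hcond : ((PySem.Chars.strip a).isEmpty
                || PySem.Chars.startswith (PySem.Chars.strip a) ['-', '-']
                || PySem.Chars.startswith (PySem.Chars.strip a) ['#']) = false := by
              rw [hm.1, hm.2]
              simp [hA]
            rw [pv_loopB_keep a _ hcond]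
            rfl
        · -- real content after the newline too
          have h1 : PySem.Chars.rstrip ('\n' :: r) = '\n' :: PySem.Chars.rstrip r := by
            simpa using pv_rstrip_append_of_ne_nil ['\n'] r hrw
          have hstrip_eq : PySem.Chars.strip l
              = PySem.Chars.lstrip a ++ '\n' :: PySem.Chars.rstrip r := by
            rw [hstrips, show PySem.Chars.lstrip a ++ '\n' :: r
                = PySem.Chars.lstrip a ++ ('\n' :: r) from rfl,
              pv_rstrip_append_of_ne_nil _ ('\n' :: r) (by rw [h1]; simp), h1]
          have htrans : ∀ p : List Char, p ≠ [] → '\n' ∉ p →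
              (∀ c ∈ p, PySem.Chars.isspace c = false) →
              PySem.Chars.startswith (PySem.Chars.strip l) p
                = PySem.Chars.startswith (PySem.Chars.strip a) p := by
            intro p hp hnl hws
            rw [Bool.eq_iff_iff, PySem.Chars.startswith_iff, PySem.Chars.startswith_iff,
              hstrip_eq, pv_prefix_append_newline_iff p _ _ hnl, ← hra',
              pv_prefix_rstrip_iff p _ hp hws]
          by_cases hm : (PySem.Chars.startswith (PySem.Chars.strip a) ['-', '-']
              || PySem.Chars.startswith (PySem.Chars.strip a) ['#']) = true
          · -- comment line: A jumps past the newline, B skips the line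
            have hm' : (PySem.Chars.startswith (PySem.Chars.strip l) ['-', '-']
                || PySem.Chars.startswith (PySem.Chars.strip l) ['#']) = true := by
              rw [htrans ['-', '-'] (by simp) (by decide)
                  (by intro c hc; fin_cases hc <;> decide),
                htrans ['#'] (by simp) (by decide)
                  (by intro c hc; fin_cases hc <;> decide)]
              exact hm
            have hfind : PySem.Chars.find (PySem.Chars.strip l) ['\n']
                = ((PySem.Chars.lstrip a).length : Int) := by
              rw [hstrip_eq]
              exact pv_find_newline _ _ ha'nl
            unfold pvLoopA
            rw [if_pos hm', dif_neg (by rw [hfind]; omega)]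
            have harg : PySem.Chars.slice (PySem.Chars.strip l)
                (some (PySem.Chars.find (PySem.Chars.strip l) ['\n'] + 1)) none
                = PySem.Chars.rstrip r := by
              rw [hfind, PySem.Chars.slice_eq_listSlice, PySem.List.slice_from _ (by omega),
                hstrip_eq, show PySem.Chars.lstrip a ++ '\n' :: PySem.Chars.rstrip r
                  = (PySem.Chars.lstrip a ++ ['\n']) ++ PySem.Chars.rstrip r by simp]
              have hcast : (((PySem.Chars.lstrip a).length : Int) + 1).toNat
                  = (PySem.Chars.lstrip a ++ ['\n']).length := by
                simp
              rw [hcast, List.drop_left]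
            rw [harg, pv_strip_rstrip, hIH, pv_loopB_skip a _ (by simp only [Bool.or_eq_true] at hm ⊢; tauto)]
          · -- effective line: both test the keywords
            have hm' : ¬ (PySem.Chars.startswith (PySem.Chars.strip l) ['-', '-']
                || PySem.Chars.startswith (PySem.Chars.strip l) ['#']) = true := by
              rw [htrans ['-', '-'] (by simp) (by decide)
                  (by intro c hc; fin_cases hc <;> decide),
                htrans ['#'] (by simp) (by decide)
                  (by intro c hc; fin_cases hc <;> decide)]
              exact hm
            unfold pvLoopA
            rw [if_neg hm']
            simp only [Bool.or_eq_true, not_or, Bool.not_eq_true] at hm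
            have hcond : ((PySem.Chars.strip a).isEmpty
                || PySem.Chars.startswith (PySem.Chars.strip a) ['-', '-']
                || PySem.Chars.startswith (PySem.Chars.strip a) ['#']) = false := by
              rw [hm.1, hm.2]
              simp [hA]
            rw [pv_loopB_keep a _ hcond]
            refine pv_any_congr _ _ _ ?_
            intro kw hkw
            exact htrans kw (pv_kw_facts kw hkw).1 (pv_kw_facts kw hkw).2.1
              (pv_kw_facts kw hkw).2.2
    · -- no newline in l: the whole text is the single line
      have hsplit : l.splitOn '\n' = [l] := by
        simp only [List.splitOn]
        exact List.splitOnP_eq_single _ _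
          (by intro x hx; simp only [beq_iff_eq]; rintro rfl; exact hn hx)
      rw [hsplit]
      have hnos : '\n' ∉ PySem.Chars.strip l := fun h => hn (pv_strip_mem h)
      by_cases hm : (PySem.Chars.startswith (PySem.Chars.strip l) ['-', '-']
          || PySem.Chars.startswith (PySem.Chars.strip l) ['#']) = true
      · have hfind : PySem.Chars.find (PySem.Chars.strip l) ['\n'] = -1 :=
          (PySem.Chars.find_eq_neg_one_iff _ _).mpr
            (fun h => hnos (List.singleton_sublist.mp h.sublist))
        unfold pvLoopA
        rw [if_pos hm, dif_pos hfind, pv_loopB_skip l _ (by simp only [Bool.or_eq_true] at hm ⊢; tauto)]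
        rfl
      · unfold pvLoopA
        rw [if_neg hm]
        simp only [Bool.or_eq_true, not_or, Bool.not_eq_true] at hm
        by_cases he : PySem.Chars.strip l = []
        · rw [pv_loopB_skip l _ (by simp [he]), he]
          decide
        · have hcond : ((PySem.Chars.strip l).isEmpty
              || PySem.Chars.startswith (PySem.Chars.strip l) ['-', '-']
              || PySem.Chars.startswith (PySem.Chars.strip l) ['#']) = false := by
            rw [hm.1, hm.2]
            simp [he]
          rw [pv_loopB_keep l _ hcond]
          rfl

-- ===== VERDICT (by name: the statement is the Claim_ definition above) =====
theorem is_modification_query_py_spec : Claim_equal_is_modification_query_py := by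
  intro query _
  unfold Spec_is_modification_query_py is_modification_query_py is_modification_query_py_alt
  exact pv_main _ _ le_rfl
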